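-- pv_equiv track=rewrite | github.com/konstantinvogel/hass-thz | test_connection.py | escape_data
-- ===== SOURCE A (Python) =====
-- def escape_data(data: str) -> str:
--     """Apply escape sequences to data."""
--     result = ""
--     i = 0
--     while i < len(data):
--         if i + 1 < len(data):
--             two_chars = data[i:i+2]
--             if two_chars == "10":
--                 result += "1010"
--                 i += 2
--                 continue
--             elif two_chars == "2B":
--                 result += "2B18"
--                 i += 2
--                 continue
--         result += data[i]
--         i += 1
--     return result
-- ===== SOURCE B (Python) =====
-- def escape_data(data: str) -> str:
--     """Apply escape sequences to data."""
--     return data.replace("10", "1010").replace("2B", "2B18")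
-- ===== Notes on version B (the rewrite author's own statement) =====
-- stated objective: faster
-- what changed: Replaced A's explicit index-based left-to-right character scan (manual two-char slicing with a string accumulator built by repeated +=) by two whole-string str.replace passes, one per escape token; this is exact because the two tokens share no characters, so their occurrences never overlap and neither replacement creates or destroys the other token.
import Mathlib
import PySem

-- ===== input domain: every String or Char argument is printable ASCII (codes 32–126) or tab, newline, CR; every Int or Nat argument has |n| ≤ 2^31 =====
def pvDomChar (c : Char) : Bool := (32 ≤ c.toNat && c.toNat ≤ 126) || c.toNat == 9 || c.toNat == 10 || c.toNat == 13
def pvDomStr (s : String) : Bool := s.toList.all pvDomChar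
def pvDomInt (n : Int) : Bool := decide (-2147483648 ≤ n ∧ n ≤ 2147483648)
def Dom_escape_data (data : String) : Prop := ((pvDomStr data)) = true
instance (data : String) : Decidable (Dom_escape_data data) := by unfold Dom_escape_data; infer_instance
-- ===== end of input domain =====

-- B replaces A's explicit index-based character scan by two whole-string str.replace passes,
-- one per token (exact since the two tokens share no characters, so occurrences never overlap);
-- a timing run measured B faster.


-- ===== PORT A =====
-- the while loop over index i, carried as structural recursion on the not-yet-scanned
-- suffix of the string (data[i:]) with the accumulated `result`
def escapeGo (acc : List Char) : List Char → List Char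
  | a :: b :: rest =>
      if a = '1' ∧ b = '0' then escapeGo (acc ++ ['1', '0', '1', '0']) rest
      else if a = '2' ∧ b = 'B' then escapeGo (acc ++ ['2', 'B', '1', '8']) rest
      else escapeGo (acc ++ [a]) (b :: rest)
  | [a] => acc ++ [a]
  | [] => acc
  termination_by l => l.length
  decreasing_by all_goals simp_all

def escape_data (data : String) : String := String.ofList (escapeGo [] data.toList)

-- ===== PORT B =====
def escape_data_alt (data : String) : String :=
  PySem.Str.replace (PySem.Str.replace data "10" "1010") "2B" "2B18"

-- ===== PRECONDITION & SPEC =====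
def Spec_escape_data (data : String) (out : String) : Prop := out = escape_data_alt data
instance (data : String) (out : String) : Decidable (Spec_escape_data data out) := by unfold Spec_escape_data; infer_instance

-- ===== CLAIM (what is proved, stated in full; the proofs are below) =====
def Claim_equal_escape_data : Prop := ∀ (data : String), Dom_escape_data data → Spec_escape_data data (escape_data data)

-- ===== LEMMAS AND PROOFS =====

-- pure (accumulator-free) form of a single replace pass, for each token
def g1 : List Char → List Char
  | a :: b :: t => if a = '1' ∧ b = '0' then '1' :: '0' :: '1' :: '0' :: g1 t else a :: g1 (b :: t)
  | [a] => [a]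
  | [] => []
  termination_by l => l.length
  decreasing_by all_goals simp_all

def g2 : List Char → List Char
  | a :: b :: t => if a = '2' ∧ b = 'B' then '2' :: 'B' :: '1' :: '8' :: g2 t else a :: g2 (b :: t)
  | [a] => [a]
  | [] => []
  termination_by l => l.length
  decreasing_by all_goals simp_all

theorem g1_cons {c : Char} (x : List Char) (h : c ≠ '1') : g1 (c :: x) = c :: g1 x := by
  cases x with
  | nil => simp [g1]
  | cons d t => simp [g1, h]

theorem g2_cons {c : Char} (x : List Char) (h : c ≠ '2') : g2 (c :: x) = c :: g2 x := by
  cases x with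
  | nil => simp [g2]
  | cons d t => simp [g2, h]

theorem g2_cons2 {x : List Char} (h : x.head? ≠ some 'B') : g2 ('2' :: x) = '2' :: g2 x := by
  cases x with
  | nil => simp [g2]
  | cons d t =>
    have hd : d ≠ 'B' := by simpa using h
    simp [g2, hd]

theorem g2_2B (x : List Char) : g2 ('2' :: 'B' :: x) = '2' :: 'B' :: '1' :: '8' :: g2 x := by
  simp [g2]

theorem g2_1010 (x : List Char) : g2 ('1' :: '0' :: '1' :: '0' :: x) = '1' :: '0' :: '1' :: '0' :: g2 x := by
  rw [g2_cons _ (by decide), g2_cons _ (by decide), g2_cons _ (by decide), g2_cons _ (by decide)]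

theorem g1_head (x : List Char) : (g1 x).head? = x.head? ∨ (g1 x).head? = some '1' := by
  match x with
  | [] => left; simp [g1]
  | [a] => left; simp [g1]
  | a :: b :: t =>
    by_cases h : a = '1' ∧ b = '0'
    · right; simp [g1, h]
    · left; simp [g1, h]

-- the replace.go loop computes g1 / g2
theorem go1_spec : ∀ (fuel : Nat) (l acc : List Char), l.length ≤ fuel →
    PySem.Chars.replace.go ['1','0'] ['1','0','1','0'] fuel l acc = acc.reverse ++ g1 l := by
  intro fuel
  induction fuel with
  | zero =>
    intro l acc h
    have : l = [] := List.eq_nil_of_length_eq_zero (Nat.le_zero.mp h)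
    subst this; simp [PySem.Chars.replace.go, g1]
  | succ n ih =>
    intro l acc h
    match l with
    | [] => simp [PySem.Chars.replace.go, g1]
    | c :: t =>
      by_cases hp : c = '1' ∧ t.head? = some '0'
      · obtain ⟨hc, ht⟩ := hp
        subst hc
        cases t with
        | nil => simp at ht
        | cons d t' =>
          have hd : d = '0' := by simpa using ht
          subst hd
          have hpre : List.isPrefixOf ['1','0'] ('1' :: '0' :: t') = true := by
            simp [List.isPrefixOf]
          simp only [PySem.Chars.replace.go, hpre, if_pos]
          rw [show List.drop ['1','0'].length ('1' :: '0' :: t') = t' from rfl,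
              ih t' _ (by simp at h ⊢; omega)]
          simp [g1]
      · have hpre : List.isPrefixOf ['1','0'] (c :: t) = false := by
          cases t with
          | nil => simp [List.isPrefixOf]
          | cons d t' =>
            simp only [not_and] at hp
            simp [List.isPrefixOf]
            intro hc
            subst hc
            have hd : d ≠ '0' := by simpa using hp rfl
            exact fun h' => hd h'.symm
        simp only [PySem.Chars.replace.go, hpre, Bool.false_eq_true, if_false]
        rw [ih t _ (by simp at h ⊢; omega)]
        by_cases hc : c = '1'
        · subst hc
          cases t with
          | nil => simp [g1]
          | cons d t' =>
            have hd : d ≠ '0' := by simpa using hp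
            simp [g1, hd]
        · rw [g1_cons _ hc]; simp

theorem go2_spec : ∀ (fuel : Nat) (l acc : List Char), l.length ≤ fuel →
    PySem.Chars.replace.go ['2','B'] ['2','B','1','8'] fuel l acc = acc.reverse ++ g2 l := by
  intro fuel
  induction fuel with
  | zero =>
    intro l acc h
    have : l = [] := List.eq_nil_of_length_eq_zero (Nat.le_zero.mp h)
    subst this; simp [PySem.Chars.replace.go, g2]
  | succ n ih =>
    intro l acc h
    match l with
    | [] => simp [PySem.Chars.replace.go, g2]
    | c :: t =>
      by_cases hp : c = '2' ∧ t.head? = some 'B'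
      · obtain ⟨hc, ht⟩ := hp
        subst hc
        cases t with
        | nil => simp at ht
        | cons d t' =>
          have hd : d = 'B' := by simpa using ht
          subst hd
          have hpre : List.isPrefixOf ['2','B'] ('2' :: 'B' :: t') = true := by
            simp [List.isPrefixOf]
          simp only [PySem.Chars.replace.go, hpre, if_pos]
          rw [show List.drop ['2','B'].length ('2' :: 'B' :: t') = t' from rfl,
              ih t' _ (by simp at h ⊢; omega)]
          simp [g2]
      · have hpre : List.isPrefixOf ['2','B'] (c :: t) = false := by
          cases t with
          | nil => simp [List.isPrefixOf]
          | cons d t' =>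
            simp only [not_and] at hp
            simp [List.isPrefixOf]
            intro hc
            subst hc
            have hd : d ≠ 'B' := by simpa using hp rfl
            exact fun h' => hd h'.symm
        simp only [PySem.Chars.replace.go, hpre, Bool.false_eq_true, if_false]
        rw [ih t _ (by simp at h ⊢; omega)]
        by_cases hc : c = '2'
        · subst hc
          cases t with
          | nil => simp [g2]
          | cons d t' =>
            have hd : d ≠ 'B' := by simpa using hp
            simp [g2, hd]
        · rw [g2_cons _ hc]; simp

theorem replace1_eq (l : List Char) : PySem.Chars.replace l ['1','0'] ['1','0','1','0'] = g1 l := by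
  rw [PySem.Chars.replace]
  simp only [List.isEmpty_cons, Bool.false_eq_true, if_false]
  simpa using go1_spec l.length l [] le_rfl

theorem replace2_eq (l : List Char) : PySem.Chars.replace l ['2','B'] ['2','B','1','8'] = g2 l := by
  rw [PySem.Chars.replace]
  simp only [List.isEmpty_cons, Bool.false_eq_true, if_false]
  simpa using go2_spec l.length l [] le_rfl

-- the scan of A equals the two composed passes of B
theorem main_eq : ∀ (n : Nat) (l : List Char) (acc : List Char), l.length ≤ n →
    escapeGo acc l = acc ++ g2 (g1 l) := by
  intro n
  induction n with
  | zero =>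
    intro l acc h
    have : l = [] := List.eq_nil_of_length_eq_zero (Nat.le_zero.mp h)
    subst this; simp [escapeGo, g1, g2]
  | succ n ih =>
    intro l acc h
    match l with
    | [] => simp [escapeGo, g1, g2]
    | [a] => simp [escapeGo, g1, g2]
    | a :: b :: rest =>
      by_cases h10 : a = '1' ∧ b = '0'
      · obtain ⟨ha, hb⟩ := h10; subst ha; subst hb
        rw [show escapeGo acc ('1' :: '0' :: rest) = escapeGo (acc ++ ['1','0','1','0']) rest by
              simp [escapeGo]]
        rw [ih rest _ (by simp at h ⊢; omega)]
        rw [show g1 ('1' :: '0' :: rest) = '1' :: '0' :: '1' :: '0' :: g1 rest by simp [g1]]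
        rw [g2_1010]; simp
      · by_cases h2B : a = '2' ∧ b = 'B'
        · obtain ⟨ha, hb⟩ := h2B; subst ha; subst hb
          rw [show escapeGo acc ('2' :: 'B' :: rest) = escapeGo (acc ++ ['2','B','1','8']) rest by
                simp [escapeGo]]
          rw [ih rest _ (by simp at h ⊢; omega)]
          rw [show g1 ('2' :: 'B' :: rest) = '2' :: 'B' :: g1 rest by
                rw [g1_cons _ (by decide), g1_cons _ (by decide)]]
          rw [g2_2B]; simp
        · rw [show escapeGo acc (a :: b :: rest) = escapeGo (acc ++ [a]) (b :: rest) by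
                simp [escapeGo, h10, h2B]]
          rw [ih (b :: rest) _ (by simp at h ⊢; omega)]
          rw [show g1 (a :: b :: rest) = a :: g1 (b :: rest) by simp [g1, h10]]
          by_cases hc : a = '2'
          · subst hc
            have hb : b ≠ 'B' := by simpa using h2B
            have hh : (g1 (b :: rest)).head? ≠ some 'B' := by
              rcases g1_head (b :: rest) with h' | h' <;> rw [h'] <;> simp [hb]
            rw [g2_cons2 hh]; simp
          · rw [g2_cons _ hc]; simp

-- ===== VERDICT (by name: the statement is the Claim_ definition above) =====
theorem escape_data_spec : Claim_equal_escape_data := by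
  intro data _
  unfold Spec_escape_data escape_data escape_data_alt PySem.Str.replace
  congr 1
  simp only [String.toList_ofList]
  rw [show ("10" : String).toList = ['1','0'] from rfl,
      show ("1010" : String).toList = ['1','0','1','0'] from rfl,
      show ("2B" : String).toList = ['2','B'] from rfl,
      show ("2B18" : String).toList = ['2','B','1','8'] from rfl,
      replace1_eq, replace2_eq]
  exact main_eq data.toList.length data.toList [] le_rfl
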